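-- pv_equiv track=rewrite | github.com/jrmohp/useless | app.py | split_text_segments
-- ===== SOURCE A (Python) =====
-- def split_text_segments(lines, marker_line, marker_relative_index):
--     segments = []
--     current_segment = []
--
--     for i, line in enumerate(lines):
--         if line == marker_line and i - marker_relative_index == 0:
--             if current_segment:
--                 segments.append(current_segment)
--                 current_segment = []
--         current_segment.append(line)
--
--     if current_segment:
--         segments.append(current_segment)
--
--     return segments
-- ===== SOURCE B (Python) =====
-- def split_text_segments(lines, marker_line, marker_relative_index):
--     k = marker_relative_index
--     if not lines:
--         return []
--     if 0 < k < len(lines) and lines[k] == marker_line: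
--         return [lines[:k], lines[k:]]
--     return [lines]
-- ===== Notes on version B (the rewrite author's own statement) =====
-- stated objective: simpler
-- what changed: The split can fire at most once (only at index i == marker_relative_index), so B replaces the accumulating enumerate loop by a direct guard (0 < k < len(lines) and lines[k] == marker_line) and two slices.
import Mathlib
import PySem

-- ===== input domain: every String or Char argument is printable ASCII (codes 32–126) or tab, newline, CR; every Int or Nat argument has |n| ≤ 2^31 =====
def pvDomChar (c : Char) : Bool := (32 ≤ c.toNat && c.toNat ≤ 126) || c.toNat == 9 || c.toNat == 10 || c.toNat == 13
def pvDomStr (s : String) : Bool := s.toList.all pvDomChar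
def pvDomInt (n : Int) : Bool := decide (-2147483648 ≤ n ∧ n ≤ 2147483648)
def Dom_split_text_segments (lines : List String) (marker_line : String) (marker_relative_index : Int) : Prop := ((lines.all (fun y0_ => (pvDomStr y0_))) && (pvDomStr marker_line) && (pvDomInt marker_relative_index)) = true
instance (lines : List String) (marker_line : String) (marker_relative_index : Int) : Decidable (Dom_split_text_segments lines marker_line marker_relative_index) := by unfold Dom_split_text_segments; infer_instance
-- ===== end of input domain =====

-- B replaces A's accumulating single pass by a direct guard and two slices (objective: simpler).

-- ===== PORT A =====
-- the for-loop over enumerate(lines) with state (segments, current_segment); i is the running index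
def splitLoopA (m : String) (k : Int) : List String → Nat → List (List String) → List String →
    (List (List String)) × List String
  | [], _, segs, cur => (segs, cur)
  | l :: rest, i, segs, cur =>
    if l = m ∧ (i : Int) - k = 0 then
      if cur ≠ [] then
        splitLoopA m k rest (i + 1) (segs ++ [cur]) ([] ++ [l])
      else
        splitLoopA m k rest (i + 1) segs (cur ++ [l])
    else
      splitLoopA m k rest (i + 1) segs (cur ++ [l])

def split_text_segments (lines : List String) (marker_line : String) (marker_relative_index : Int) : List (List String) :=
  let r := splitLoopA marker_line marker_relative_index lines 0 [] []
  if r.2 ≠ [] then r.1 ++ [r.2] else r.1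

-- ===== PORT B =====
def split_text_segments_alt (lines : List String) (marker_line : String) (marker_relative_index : Int) : List (List String) :=
  let k := marker_relative_index
  if lines = [] then []
  else if 0 < k ∧ k < (lines.length : Int) ∧ PySem.List.pyGet? lines k = some marker_line then
    [PySem.List.slice lines none (some k), PySem.List.slice lines (some k) none]
  else [lines]

-- ===== PRECONDITION & SPEC =====
def Spec_split_text_segments (lines : List String) (marker_line : String) (marker_relative_index : Int) (out : List (List String)) : Prop := out = split_text_segments_alt lines marker_line marker_relative_index
instance (lines : List String) (marker_line : String) (marker_relative_index : Int) (out : List (List String)) : Decidable (Spec_split_text_segments lines marker_line marker_relative_index out) := by unfold Spec_split_text_segments; infer_instance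

-- ===== CLAIM (what is proved, stated in full; the proofs are below) =====
def Claim_equal_split_text_segments : Prop := ∀ (lines : List String) (marker_line : String) (marker_relative_index : Int), Dom_split_text_segments lines marker_line marker_relative_index → Spec_split_text_segments lines marker_line marker_relative_index (split_text_segments lines marker_line marker_relative_index)

-- ===== LEMMAS AND PROOFS =====

-- Characterisation of A's loop: the split fires at most once, at relative position t = k - i.
theorem splitLoopA_char (m : String) (k : Int) :
    ∀ (lines : List String) (i : Nat) (segs : List (List String)) (cur : List String),
      splitLoopA m k lines i segs cur =
        if h : ∃ t : Nat, t < lines.length ∧ ((i : Int) + t = k) ∧ lines[t]? = some m ∧ (cur ≠ [] ∨ 0 < t)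
        then
          let t := (k - i).toNat
          (segs ++ [cur ++ lines.take t], lines.drop t)
        else (segs, cur ++ lines) := by
  intro lines
  induction lines with
  | nil =>
    intro i segs cur
    simp [splitLoopA]
  | cons l rest ih =>
    intro i segs cur
    by_cases hm : l = m ∧ (i : Int) - k = 0
    · have hik : (i : Int) = k := by omega
      by_cases hcur : cur ≠ []
      · rw [splitLoopA, if_pos hm, if_pos hcur, ih]
        have hrest : ¬ ∃ t : Nat, t < rest.length ∧ ((i + 1 : Nat) : Int) + t = k ∧ rest[t]? = some m ∧ (([] ++ [l] : List String) ≠ [] ∨ 0 < t) := by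
          rintro ⟨t, _, ht, _, _⟩; push_cast at ht; omega
        rw [dif_neg hrest]
        have hex : ∃ t : Nat, t < (l :: rest).length ∧ ((i : Int) + t = k) ∧ (l :: rest)[t]? = some m ∧ (cur ≠ [] ∨ 0 < t) := by
          exact ⟨0, by simp, by omega, by simp [hm.1], Or.inl hcur⟩
        rw [dif_pos hex]
        have ht0 : (k - i).toNat = 0 := by omega
        simp [ht0]
      · rw [not_not] at hcur; subst hcur
        rw [splitLoopA, if_pos hm, if_neg (by simp), ih]
        have hrest : ¬ ∃ t : Nat, t < rest.length ∧ ((i + 1 : Nat) : Int) + t = k ∧ rest[t]? = some m ∧ (([] ++ [l] : List String) ≠ [] ∨ 0 < t) := by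
          rintro ⟨t, _, ht, _, _⟩; push_cast at ht; omega
        rw [dif_neg hrest]
        have hno : ¬ ∃ t : Nat, t < (l :: rest).length ∧ ((i : Int) + t = k) ∧ (l :: rest)[t]? = some m ∧ (([] : List String) ≠ [] ∨ 0 < t) := by
          rintro ⟨t, _, ht, _, hd⟩
          have : t = 0 := by omega
          subst this; simp at hd
        rw [dif_neg hno]
        simp
    · rw [splitLoopA, if_neg hm, ih]
      by_cases hex : ∃ t : Nat, t < (l :: rest).length ∧ ((i : Int) + t = k) ∧ (l :: rest)[t]? = some m ∧ (cur ≠ [] ∨ 0 < t)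
      · obtain ⟨t, htlen, hti, htm, _⟩ := hex
        have ht0 : 0 < t := by
          rcases Nat.eq_zero_or_pos t with h0 | h0
          · subst h0; simp at htm; exact absurd ⟨htm, by omega⟩ hm
          · exact h0
        obtain ⟨t', rfl⟩ : ∃ t', t = t' + 1 := ⟨t - 1, by omega⟩
        simp only [List.length_cons, Nat.add_lt_add_iff_right] at htlen
        rw [List.getElem?_cons_succ] at htm
        have hrest : ∃ u : Nat, u < rest.length ∧ ((i + 1 : Nat) : Int) + u = k ∧ rest[u]? = some m ∧ ((cur ++ [l] : List String) ≠ [] ∨ 0 < u) := by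
          refine ⟨t', htlen, by push_cast; push_cast at hti; omega, htm, Or.inl (by simp)⟩
        rw [dif_pos hrest]
        have hex' : ∃ u : Nat, u < (l :: rest).length ∧ ((i : Int) + u = k) ∧ (l :: rest)[u]? = some m ∧ (cur ≠ [] ∨ 0 < u) := by
          exact ⟨t' + 1, by simp; omega, hti, by rw [List.getElem?_cons_succ]; exact htm, Or.inr (by omega)⟩
        rw [dif_pos hex']
        have h2 : (k - ((i : Int) + 1)).toNat = t' := by push_cast at hti; omega
        have h3 : (k - (i : Int)).toNat = t' + 1 := by push_cast at hti; omega
        simp only [Nat.cast_add, Nat.cast_one, h2, h3]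
        simp [List.take_succ_cons, List.drop_succ_cons]
      · rw [dif_neg hex]
        have hrest : ¬ ∃ u : Nat, u < rest.length ∧ ((i + 1 : Nat) : Int) + u = k ∧ rest[u]? = some m ∧ ((cur ++ [l] : List String) ≠ [] ∨ 0 < u) := by
          rintro ⟨u, h1, h2, h3, _⟩
          exact hex ⟨u + 1, by simp; omega, by push_cast at h2 ⊢; omega, by rw [List.getElem?_cons_succ]; exact h3, Or.inr (by omega)⟩
        rw [dif_neg hrest]
        simp

-- ===== VERDICT (by name: the statement is the Claim_ definition above) =====
theorem split_text_segments_spec : Claim_equal_split_text_segments := by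
  intro lines m k _
  unfold Spec_split_text_segments split_text_segments split_text_segments_alt
  rw [splitLoopA_char]
  by_cases hnil : lines = []
  · subst hnil; simp
  · rw [if_neg hnil]
    by_cases hex : ∃ t : Nat, t < lines.length ∧ (((0 : Nat) : Int) + t = k) ∧ lines[t]? = some m ∧ (([] : List String) ≠ [] ∨ 0 < t)
    · obtain ⟨t, htlen, hti, htm, htd⟩ := hex
      have ht0 : 0 < t := by simpa using htd
      have htk : (t : Int) = k := by push_cast at hti; omega
      have hB : 0 < k ∧ k < (lines.length : Int) ∧ PySem.List.pyGet? lines k = some m := by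
        refine ⟨by omega, by omega, ?_⟩
        rw [← htk, PySem.List.pyGet?_natCast]
        exact htm
      rw [dif_pos ⟨t, htlen, hti, htm, htd⟩, if_pos hB]
      have hkt : (k - ((0 : Nat) : Int)).toNat = t := by omega
      have hdrop : lines.drop t ≠ [] := by
        intro h
        have := List.length_drop (l := lines) (i := t)
        rw [h] at this; simp at this; omega
      rw [hkt, if_pos (by simpa using hdrop)]
      rw [← htk]
      rw [PySem.List.slice_to_natCast, PySem.List.slice_from_natCast]
      simp
    · rw [dif_neg hex]
      have hB : ¬ (0 < k ∧ k < (lines.length : Int) ∧ PySem.List.pyGet? lines k = some m) := by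
        rintro ⟨hk0, hklen, hkm⟩
        apply hex
        refine ⟨k.toNat, by omega, by push_cast; omega, ?_, Or.inr (by omega)⟩
        rw [PySem.List.pyGet?_of_nonneg lines (by omega)] at hkm
        exact hkm
      rw [if_neg hB]
      simp [hnil]
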